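-- pv_equiv track=rewrite | github.com/firedrakeproject/fiat | FIAT/macro.py | make_topology
-- ===== SOURCE A (Python) =====
-- from itertools import chain, combinations
--
-- def make_topology(sd, num_verts, edges):
--     topology = {}
--     topology[0] = {i: (i,) for i in range(num_verts)}
--     topology[1] = dict(enumerate(sorted(edges)))
--
--     # Get an adjacency list for each vertex
--     adjacency = {v: set(chain.from_iterable(verts for verts in edges if v in verts))
--                  for v in topology[0]}
--
--     # Complete the higher dimensional facets by appending a vertex
--     # adjacent to the vertices of codimension 1 facets
--     for dim in range(1, sd):
--         entities = []
--         for entity in topology[dim]: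
--             facet = topology[dim][entity]
--             facet_verts = set(facet)
--             for v in range(min(facet)):
--                 if facet_verts < adjacency[v]:
--                     entities.append((v, *facet))
--         topology[dim+1] = dict(enumerate(sorted(entities)))
--     return topology
-- ===== SOURCE B (Python) =====
-- def make_topology(sd, num_verts, edges):
--     topology = {0: {i: (i,) for i in range(num_verts)},
--                 1: dict(enumerate(sorted(edges)))}
--
--     # adjacency built in ONE pass over the edges (A rescans all edges per vertex
--     # and materialises a set for every vertex, even isolated ones)
--     adjacency = {}
--     for verts in edges:
--         for v in verts:
--             adjacency.setdefault(v, set()).update(verts)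
--
--     # ONE depth-first pass: every dim-d simplex is an edge extended in front by a
--     # strictly decreasing chain of vertices, each adjacent to everything behind it,
--     # so a single recursion per edge fills every level at once; each level is
--     # sorted once at the end (the result only depends on the set at each level).
--     levels = {d: [] for d in range(2, sd + 1)}
--
--     def extend(simplex, dim):
--         if dim > sd:
--             return
--         for v in range(min(simplex)):
--             if all(u in adjacency.get(v, ()) for u in simplex):
--                 t = (v, *simplex)
--                 levels[dim].append(t)
--                 extend(t, dim + 1)
--
--     for e in edges:
--         extend(tuple(e), 2)
--
--     for d in range(2, sd + 1):
--         topology[d] = dict(enumerate(sorted(levels[d])))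
--     return topology
-- ===== Notes on version B (the rewrite author's own statement) =====
-- stated objective: faster
-- what changed: B builds the vertex-adjacency sets in a single pass over the edge list (A rescans every edge once per vertex) and replaces A's level-by-level loop (each level sorted and then rescanned to produce the next) by one depth-first recursion per edge that emits the simplices of every dimension at once, each level being sorted only once at the end.
import Mathlib
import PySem

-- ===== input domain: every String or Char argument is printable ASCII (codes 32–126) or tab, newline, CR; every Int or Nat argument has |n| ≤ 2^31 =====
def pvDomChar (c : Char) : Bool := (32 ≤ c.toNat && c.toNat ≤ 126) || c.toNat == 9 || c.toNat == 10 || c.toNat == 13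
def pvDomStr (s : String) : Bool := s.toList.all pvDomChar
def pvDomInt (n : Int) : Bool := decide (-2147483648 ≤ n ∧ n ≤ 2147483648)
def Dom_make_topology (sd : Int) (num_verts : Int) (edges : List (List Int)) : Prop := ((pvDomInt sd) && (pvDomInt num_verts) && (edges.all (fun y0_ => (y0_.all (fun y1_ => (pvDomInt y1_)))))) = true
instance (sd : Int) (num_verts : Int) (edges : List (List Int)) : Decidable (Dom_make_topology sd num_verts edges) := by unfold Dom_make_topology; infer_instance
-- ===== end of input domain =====

-- B builds the adjacency sets in one pass over the edges (A rescans them per vertex) and fills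
-- all higher-dimensional levels in a single depth-first recursion per edge, sorting each level
-- once at the end, instead of A's level-by-level loop; the return value is proved equal on Pre_.

-- ===== PORT A =====
-- adjacency = {v: set(chain.from_iterable(verts for verts in edges if v in verts)) for v in topology[0]}
-- (a dict comprehension over distinct keys: its items are exactly the pairs in order)
def mtA_adj (num_verts : Int) (edges : List (List Int)) : PySem.Dict Int (PySem.Set Int) :=
  ⟨(PySem.List.pyRange 0 num_verts).map (fun v =>
      (v, PySem.Set.ofList ((edges.filter (fun verts => verts.contains v)).flatten)))⟩

-- one iteration of "for dim in range(1, sd)"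
def mtA_step (adj : PySem.Dict Int (PySem.Set Int))
    (topology : PySem.Dict Int (PySem.Dict Int (List Int))) (dim : Int) :
    PySem.Dict Int (PySem.Dict Int (List Int)) :=
  let cur := PySem.Dict.getD topology dim ⟨[]⟩          -- topology[dim]; key always present
  let entities : List (List Int) :=
    (PySem.Dict.keys cur).foldl (fun entities entity =>
      let facet := PySem.Dict.getD cur entity []        -- topology[dim][entity]; key always present
      let facet_verts := PySem.Set.ofList facet
      -- for v in range(min(facet)):  min of [] raises ValueError: those inputs are outside Pre_
      (PySem.List.pyRange 0 ((PySem.List.min? facet (fun x => x)).getD 0)).foldl (fun entities v =>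
        -- facet_verts < adjacency[v]  (proper subset); a KeyError of adjacency[v] is outside Pre_
        if PySem.Set.issubset facet_verts (PySem.Dict.getD adj v PySem.Set.empty)
            && !(PySem.Set.equal facet_verts (PySem.Dict.getD adj v PySem.Set.empty)) then
          entities ++ [v :: facet]
        else entities) entities) []
  PySem.Dict.insert topology (dim + 1) ⟨PySem.List.enumerate (PySem.List.sorted entities (fun e => e))⟩

def make_topology (sd : Int) (num_verts : Int) (edges : List (List Int)) :
    List (Int × List (Int × List Int)) :=
  -- topology[0] = {i: (i,) for i in range(num_verts)}; topology[1] = dict(enumerate(sorted(edges)))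
  -- (both comprehensions have distinct keys, so the dicts' items are exactly the pairs in order)
  let topology : PySem.Dict Int (PySem.Dict Int (List Int)) :=
    PySem.Dict.insert
      (PySem.Dict.insert ⟨[]⟩ 0 ⟨(PySem.List.pyRange 0 num_verts).map (fun i => (i, [i]))⟩)
      1 ⟨PySem.List.enumerate (PySem.List.sorted edges (fun e => e))⟩
  let adjacency := mtA_adj num_verts edges
  let topology := (PySem.List.pyRange 1 sd).foldl (mtA_step adjacency) topology
  topology.items.map (fun p => (p.1, p.2.items))

-- ===== PORT B =====
-- adjacency = {}; one pass: adjacency.setdefault(v, set()).update(verts); lookups use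
-- adjacency.get(v, ()) — getD with the empty set, exact: membership in () and in set() agree
def mtB_adj (edges : List (List Int)) : PySem.Dict Int (PySem.Set Int) :=
  edges.foldl (fun adj verts =>
    verts.foldl (fun adj v =>
      PySem.Dict.modify adj v PySem.Set.empty (fun s => PySem.Set.update s verts)) adj) ⟨[]⟩

-- def extend(simplex, dim): the depth-first recursion appending into levels[dim] and recursing;
-- fuel = (sd-1).toNat bounds the recursion depth (dim only grows while dim ≤ sd), so the
-- fuel-0 branch is never taken on a reachable call; min of an empty simplex (outside Pre_)
-- and levels[dim] (key always present: 2 ≤ dim ≤ sd) are read with getD, exact inside Pre_.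
def mtB_extend (adj : PySem.Dict Int (PySem.Set Int)) (sd : Int) :
    Nat → List Int → Int → PySem.Dict Int (List (List Int)) → PySem.Dict Int (List (List Int))
  | 0, _, _, levels => levels
  | fuel+1, simplex, dim, levels =>
    if sd < dim then levels
    else
      (PySem.List.pyRange 0 ((PySem.List.min? simplex (fun x => x)).getD 0)).foldl
        (fun levels v =>
          if simplex.all (fun u => PySem.Set.contains (PySem.Dict.getD adj v PySem.Set.empty) u) then
            mtB_extend adj sd fuel (v :: simplex) (dim + 1)
              (PySem.Dict.modify levels dim [] (fun l => l ++ [v :: simplex]))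
          else levels) levels

def make_topology_alt (sd : Int) (num_verts : Int) (edges : List (List Int)) :
    List (Int × List (Int × List Int)) :=
  let topology : PySem.Dict Int (PySem.Dict Int (List Int)) :=
    PySem.Dict.insert
      (PySem.Dict.insert ⟨[]⟩ 0 ⟨(PySem.List.pyRange 0 num_verts).map (fun i => (i, [i]))⟩)
      1 ⟨PySem.List.enumerate (PySem.List.sorted edges (fun e => e))⟩
  let adjacency := mtB_adj edges
  -- levels = {d: [] for d in range(2, sd + 1)}
  let levels : PySem.Dict Int (List (List Int)) :=
    ⟨(PySem.List.pyRange 2 (sd + 1)).map (fun d => (d, ([] : List (List Int))))⟩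
  -- for e in edges: extend(tuple(e), 2)
  let levels := edges.foldl (fun levels e => mtB_extend adjacency sd (sd - 1).toNat e 2 levels) levels
  -- for d in range(2, sd + 1): topology[d] = dict(enumerate(sorted(levels[d])))
  let topology := (PySem.List.pyRange 2 (sd + 1)).foldl (fun topo d =>
      PySem.Dict.insert topo d
        ⟨PySem.List.enumerate (PySem.List.sorted (PySem.Dict.getD levels d []) (fun x => x))⟩)
    topology
  topology.items.map (fun p => (p.1, p.2.items))

-- ===== PRECONDITION & SPEC =====
-- Exactly where A returns: when sd ≥ 2, an empty edge makes min(facet) raise ValueError and an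
-- edge whose minimum exceeds both num_verts and 0 makes adjacency[v] raise KeyError.
def Pre_make_topology (sd : Int) (num_verts : Int) (edges : List (List Int)) : Prop :=
  sd ≤ 1 ∨ ∀ e ∈ edges, ∃ x ∈ e, (x ≤ num_verts ∨ x ≤ 0)
instance (sd : Int) (num_verts : Int) (edges : List (List Int)) : Decidable (Pre_make_topology sd num_verts edges) := by unfold Pre_make_topology; infer_instance

def pvWitness_make_topology : Int × Int × List (List Int) := (2, 3, [[0, 1], [0, 2], [1, 2]])

def Spec_make_topology (sd : Int) (num_verts : Int) (edges : List (List Int)) (out : List (Int × List (Int × List Int))) : Prop := out = make_topology_alt sd num_verts edges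
instance (sd : Int) (num_verts : Int) (edges : List (List Int)) (out : List (Int × List (Int × List Int))) : Decidable (Spec_make_topology sd num_verts edges out) := by unfold Spec_make_topology; infer_instance

-- ===== CLAIM (what is proved, stated in full; the proofs are below) =====
def Claim_equal_make_topology : Prop := ∀ (sd : Int) (num_verts : Int) (edges : List (List Int)), Dom_make_topology sd num_verts edges → Pre_make_topology sd num_verts edges → Spec_make_topology sd num_verts edges (make_topology sd num_verts edges)

-- ===== LEMMAS AND PROOFS =====

-- v and u lie on a common edge
def AdjRel (edges : List (List Int)) (v u : Int) : Prop := ∃ e ∈ edges, v ∈ e ∧ u ∈ e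

-- the invariant on the facets of a level
def InvF (num_verts : Int) (f : List Int) : Prop :=
  ∃ m, PySem.List.min? f (fun x => x) = some m ∧ (m ≤ num_verts ∨ m ≤ 0)

-- the one-step extension of a facet under B's adjacency test (the common abstraction)
def EBf (adj : PySem.Dict Int (PySem.Set Int)) (facet : List Int) : List (List Int) :=
  ((PySem.List.pyRange 0 ((PySem.List.min? facet (fun x => x)).getD 0)).filter (fun v =>
      facet.all (fun u => PySem.Set.contains (PySem.Dict.getD adj v PySem.Set.empty) u))).map
    (fun v => v :: facet)

-- the simplices of depth j+1 below a facet, stratified as B's DFS emits them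
def Sx (adj : PySem.Dict Int (PySem.Set Int)) : Nat → List Int → List (List Int)
  | 0, f => EBf adj f
  | j+1, f => (EBf adj f).flatMap (Sx adj j)

-- lookup in a dict comprehension over distinct keys
theorem getD_cons {β : Type} (p : Int × β) (t : List (Int × β)) (k : Int) (d : β) :
    PySem.Dict.getD ⟨p :: t⟩ k d = if k = p.1 then p.2 else PySem.Dict.getD ⟨t⟩ k d := by
  by_cases h : p.1 = k
  · subst h; simp [PySem.Dict.getD, PySem.Dict.get?]
  · simp [PySem.Dict.getD, PySem.Dict.get?, h, Ne.symm h]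

theorem getD_mapComp {β : Type} (l : List Int) (f : Int → β) (v : Int) (d : β) :
    PySem.Dict.getD ⟨l.map (fun i => (i, f i))⟩ v d = if v ∈ l then f v else d := by
  induction l with
  | nil => simp [PySem.Dict.getD, PySem.Dict.get?]
  | cons a t ih =>
    rw [List.map_cons, getD_cons, ih]
    by_cases h : v = a
    · subst h; simp
    · simp [h]

-- folding over a nodup-keyed dict's keys with the matching lookups is folding over its values
theorem foldl_keys_getD {β γ : Type} (l : List (Int × β)) (G : γ → β → γ) (db : β) (init : γ)
    (hnd : (l.map Prod.fst).Nodup) :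
    (PySem.Dict.keys ⟨l⟩).foldl (fun acc k => G acc (PySem.Dict.getD ⟨l⟩ k db)) init
      = l.foldl (fun acc p => G acc p.2) init := by
  induction l generalizing init with
  | nil => rfl
  | cons p t ih =>
    simp only [List.map_cons, List.nodup_cons] at hnd
    have hkeys : PySem.Dict.keys (⟨p :: t⟩ : PySem.Dict Int β) = p.1 :: t.map Prod.fst := rfl
    rw [hkeys, List.foldl_cons, getD_cons, if_pos rfl,
      PySem.List.foldl_congr_mem (t.map Prod.fst)
        (fun acc k => G acc (PySem.Dict.getD ⟨p :: t⟩ k db))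
        (fun acc k => G acc (PySem.Dict.getD ⟨t⟩ k db)) _
        (by intro acc k hk
            have hne : ¬ k = p.1 := by rintro rfl; exact hnd.1 hk
            show G acc (PySem.Dict.getD ⟨p :: t⟩ k db) = G acc (PySem.Dict.getD ⟨t⟩ k db)
            rw [getD_cons, if_neg hne])]
    have h2 := ih (G init p.2) hnd.2
    rw [List.foldl_cons]
    rw [← h2]; rfl

theorem enum_fst_ge {α : Type} (xs : List α) (s k : Int)
    (h : k ∈ (PySem.List.enumerate xs s).map Prod.fst) : s ≤ k := by
  induction xs generalizing s with
  | nil => simp [PySem.List.enumerate] at h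
  | cons x t ih =>
    simp only [PySem.List.enumerate, List.map_cons, List.mem_cons] at h
    rcases h with h | h
    · omega
    · have := ih (s + 1) h; omega

theorem enum_fst_nodup {α : Type} (xs : List α) (s : Int) :
    ((PySem.List.enumerate xs s).map Prod.fst).Nodup := by
  induction xs generalizing s with
  | nil => simp [PySem.List.enumerate]
  | cons x t ih =>
    simp only [PySem.List.enumerate, List.map_cons, List.nodup_cons]
    exact ⟨fun h => by have := enum_fst_ge t (s + 1) s h; omega, ih (s + 1)⟩

theorem foldl_enum_snd {α γ : Type} (xs : List α) (s : Int) (G : γ → α → γ) (init : γ) :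
    (PySem.List.enumerate xs s).foldl (fun acc p => G acc p.2) init = xs.foldl G init := by
  induction xs generalizing s init with
  | nil => rfl
  | cons x t ih => simp only [PySem.List.enumerate, List.foldl_cons]; exact ih (s + 1) _

-- membership in A's adjacency sets
theorem memA (num_verts : Int) (edges : List (List Int)) (v u : Int)
    (hv : 0 ≤ v ∧ v < num_verts) :
    u ∈ PySem.Dict.getD (mtA_adj num_verts edges) v PySem.Set.empty ↔ AdjRel edges v u := by
  unfold mtA_adj
  rw [getD_mapComp, if_pos (PySem.List.mem_pyRange_one.mpr hv)]
  simp only [PySem.Set.mem_ofList, List.mem_flatten, List.mem_filter, AdjRel,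
    List.contains_eq_mem, decide_eq_true_eq]
  constructor
  · rintro ⟨e, ⟨he, hve⟩, hue⟩; exact ⟨e, he, hve, hue⟩
  · rintro ⟨e, he, hve, hue⟩; exact ⟨e, ⟨he, hve⟩, hue⟩

theorem memB_inner (verts l : List Int) (d : PySem.Dict Int (PySem.Set Int)) (v u : Int) :
    u ∈ PySem.Dict.getD
      (l.foldl (fun adj x =>
        PySem.Dict.modify adj x PySem.Set.empty (fun s => PySem.Set.update s verts)) d)
      v PySem.Set.empty
    ↔ u ∈ PySem.Dict.getD d v PySem.Set.empty ∨ (v ∈ l ∧ u ∈ verts) := by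
  induction l generalizing d with
  | nil => simp
  | cons x t ih =>
    rw [List.foldl_cons, ih]
    unfold PySem.Dict.modify
    rw [PySem.Dict.getD_insert]
    by_cases hvx : v = x
    · rw [if_pos hvx]
      subst hvx
      simp only [PySem.Set.mem_update, List.mem_cons]
      tauto
    · rw [if_neg hvx]
      simp only [List.mem_cons]
      tauto

theorem memB_aux (es : List (List Int)) (d : PySem.Dict Int (PySem.Set Int)) (v u : Int) :
    u ∈ PySem.Dict.getD
      (es.foldl (fun adj verts =>
        verts.foldl (fun adj x =>
          PySem.Dict.modify adj x PySem.Set.empty (fun s => PySem.Set.update s verts)) adj) d)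
      v PySem.Set.empty
    ↔ u ∈ PySem.Dict.getD d v PySem.Set.empty ∨ AdjRel es v u := by
  induction es generalizing d with
  | nil => simp [AdjRel]
  | cons e t ih =>
    rw [List.foldl_cons, ih, memB_inner e e d v u]
    simp only [AdjRel, List.mem_cons]
    constructor
    · rintro ((h | h) | ⟨e', he', hs⟩)
      · left; exact h
      · right; exact ⟨e, Or.inl rfl, h⟩
      · right; exact ⟨e', Or.inr he', hs⟩
    · rintro (h | ⟨e', (rfl | he'), hs⟩)
      · left; left; exact h
      · left; right; exact hs
      · right; exact ⟨e', he', hs⟩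

theorem memB (edges : List (List Int)) (v u : Int) :
    u ∈ PySem.Dict.getD (mtB_adj edges) v PySem.Set.empty ↔ AdjRel edges v u := by
  unfold mtB_adj
  rw [memB_aux edges _ v u]
  simp [PySem.Dict.getD, PySem.Dict.get?]

-- the two membership tests agree on every vertex the loops actually visit
theorem cond_eq (num_verts : Int) (edges : List (List Int)) (facet : List Int) (v m : Int)
    (hm : PySem.List.min? facet (fun x => x) = some m) (hmn : m ≤ num_verts ∨ m ≤ 0)
    (hv : 0 ≤ v) (hvm : v < m) :
    (PySem.Set.issubset (PySem.Set.ofList facet)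
        (PySem.Dict.getD (mtA_adj num_verts edges) v PySem.Set.empty)
      && !(PySem.Set.equal (PySem.Set.ofList facet)
        (PySem.Dict.getD (mtA_adj num_verts edges) v PySem.Set.empty)))
    = facet.all (fun u => PySem.Set.contains
        (PySem.Dict.getD (mtB_adj edges) v PySem.Set.empty) u) := by
  have hvn : 0 ≤ v ∧ v < num_verts := ⟨hv, by omega⟩
  have hmin : ∀ y ∈ facet, m ≤ y := PySem.List.min?_isMin hm
  have hmem : m ∈ facet := PySem.List.min?_mem hm
  have hA := memA num_verts edges v (hv := hvn)
  have hB := memB edges v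
  rw [Bool.eq_iff_iff]
  simp only [Bool.and_eq_true, Bool.not_eq_eq_eq_not, Bool.not_true,
    PySem.Set.issubset, PySem.Set.equal, PySem.Set.contains, List.all_eq_true,
    List.contains_eq_mem, decide_eq_true_eq, Bool.and_eq_false_iff,
    List.all_eq_false, PySem.Set.mem_ofList]
  constructor
  · rintro ⟨hsub, _⟩ u hu
    exact (hB u).mpr ((hA u).mp (hsub u hu))
  · intro h
    refine ⟨fun u hu => (hA u).mpr ((hB u).mp (h u hu)), Or.inr ⟨v, ?_, ?_⟩⟩
    · rcases (hB m).mp (h m hmem) with ⟨e, he, hve, _⟩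
      exact (hA v).mpr ⟨e, he, hve, hve⟩
    · intro hvf
      have := hmin v hvf
      omega

-- one iteration of A's dim-loop equals the one-step extension of its level list
theorem step_eq (num_verts : Int) (edges : List (List Int))
    (topo : PySem.Dict Int (PySem.Dict Int (List Int))) (facets : List (List Int)) (dim : Int)
    (hg : PySem.Dict.getD topo dim ⟨[]⟩ = ⟨PySem.List.enumerate facets⟩)
    (hInv : ∀ f ∈ facets, InvF num_verts f) :
    mtA_step (mtA_adj num_verts edges) topo dim
      = PySem.Dict.insert topo (dim + 1)
          ⟨PySem.List.enumerate
            (PySem.List.sorted (facets.flatMap (EBf (mtB_adj edges))) (fun e => e))⟩ := by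
  unfold mtA_step
  rw [hg]
  dsimp only
  suffices h :
      List.foldl
        (fun entities entity =>
          List.foldl
            (fun entities v =>
              if ((PySem.Set.ofList (PySem.Dict.getD ⟨PySem.List.enumerate facets⟩ entity [])).issubset
                    ((mtA_adj num_verts edges).getD v PySem.Set.empty) &&
                  !(PySem.Set.ofList (PySem.Dict.getD ⟨PySem.List.enumerate facets⟩ entity [])).equal
                      ((mtA_adj num_verts edges).getD v PySem.Set.empty)) = true then
                entities ++ [v :: PySem.Dict.getD ⟨PySem.List.enumerate facets⟩ entity []]
              else entities)
            entities
            (PySem.List.pyRange 0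
              ((PySem.List.min? (PySem.Dict.getD ⟨PySem.List.enumerate facets⟩ entity []) (fun x => x)).getD 0)))
        [] (PySem.Dict.keys ⟨PySem.List.enumerate facets⟩)
      = facets.flatMap (EBf (mtB_adj edges)) by
    rw [h]
  calc
    List.foldl
        (fun entities entity =>
          List.foldl
            (fun entities v =>
              if ((PySem.Set.ofList (PySem.Dict.getD ⟨PySem.List.enumerate facets⟩ entity [])).issubset
                    ((mtA_adj num_verts edges).getD v PySem.Set.empty) &&
                  !(PySem.Set.ofList (PySem.Dict.getD ⟨PySem.List.enumerate facets⟩ entity [])).equal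
                      ((mtA_adj num_verts edges).getD v PySem.Set.empty)) = true then
                entities ++ [v :: PySem.Dict.getD ⟨PySem.List.enumerate facets⟩ entity []]
              else entities)
            entities
            (PySem.List.pyRange 0
              ((PySem.List.min? (PySem.Dict.getD ⟨PySem.List.enumerate facets⟩ entity [])
                (fun x => x)).getD 0)))
        [] (PySem.Dict.keys ⟨PySem.List.enumerate facets⟩)
      = List.foldl
          (fun (entities : List (List Int)) (p : Int × List Int) =>
            List.foldl
            (fun entities v =>
              if ((PySem.Set.ofList p.2).issubset
                    ((mtA_adj num_verts edges).getD v PySem.Set.empty) &&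
                  !(PySem.Set.ofList p.2).equal
                      ((mtA_adj num_verts edges).getD v PySem.Set.empty)) = true then
                entities ++ [v :: p.2]
              else entities)
            entities
            (PySem.List.pyRange 0 ((PySem.List.min? p.2 (fun x => x)).getD 0)))
          [] (PySem.List.enumerate facets) :=
        foldl_keys_getD (PySem.List.enumerate facets)
          (fun entities facet =>
            List.foldl
            (fun entities v =>
              if ((PySem.Set.ofList facet).issubset
                    ((mtA_adj num_verts edges).getD v PySem.Set.empty) &&
                  !(PySem.Set.ofList facet).equal
                      ((mtA_adj num_verts edges).getD v PySem.Set.empty)) = true then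
                entities ++ [v :: facet]
              else entities)
            entities
            (PySem.List.pyRange 0 ((PySem.List.min? facet (fun x => x)).getD 0)))
          [] [] (enum_fst_nodup facets 0)
    _ = List.foldl
          (fun (entities : List (List Int)) (facet : List Int) =>
            List.foldl
            (fun entities v =>
              if ((PySem.Set.ofList facet).issubset
                    ((mtA_adj num_verts edges).getD v PySem.Set.empty) &&
                  !(PySem.Set.ofList facet).equal
                      ((mtA_adj num_verts edges).getD v PySem.Set.empty)) = true then
                entities ++ [v :: facet]
              else entities)
            entities
            (PySem.List.pyRange 0 ((PySem.List.min? facet (fun x => x)).getD 0)))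
          [] facets :=
        foldl_enum_snd facets 0
          (fun entities facet =>
            List.foldl
            (fun entities v =>
              if ((PySem.Set.ofList facet).issubset
                    ((mtA_adj num_verts edges).getD v PySem.Set.empty) &&
                  !(PySem.Set.ofList facet).equal
                      ((mtA_adj num_verts edges).getD v PySem.Set.empty)) = true then
                entities ++ [v :: facet]
              else entities)
            entities
            (PySem.List.pyRange 0 ((PySem.List.min? facet (fun x => x)).getD 0)))
          []
    _ = List.flatMap
          (fun facet =>
            List.map (fun v => v :: facet)
              (List.filter
                (fun v =>
                  ((PySem.Set.ofList facet).issubset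
                      ((mtA_adj num_verts edges).getD v PySem.Set.empty) &&
                    !(PySem.Set.ofList facet).equal
                        ((mtA_adj num_verts edges).getD v PySem.Set.empty)))
                (PySem.List.pyRange 0 ((PySem.List.min? facet (fun x => x)).getD 0))))
          facets := by
        simp only [PySem.List.foldl_append_if]
        exact (PySem.List.foldl_append_eq_flatMap _ _ _).trans (List.nil_append _)
    _ = facets.flatMap (EBf (mtB_adj edges)) := by
        apply List.flatMap_congr
        intro facet hf
        unfold EBf
        congr 1
        apply List.filter_congr
        intro v hvr
        rcases hInv facet hf with ⟨m, hm, hmn⟩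
        have hvb := PySem.List.mem_pyRange_one.mp hvr
        rw [hm, Option.getD_some] at hvb
        exact cond_eq num_verts edges facet v m hm hmn hvb.1 hvb.2

-- the invariant is preserved by the one-step extension
theorem inv_EBf (num_verts : Int) (adj : PySem.Dict Int (PySem.Set Int))
    (f : List Int) (hf : InvF num_verts f) : ∀ g ∈ EBf adj f, InvF num_verts g := by
  intro g hg
  unfold EBf at hg
  rcases List.mem_map.mp hg with ⟨v, hvf, rfl⟩
  rcases hf with ⟨m, hm, hmn⟩
  have hvb := PySem.List.mem_pyRange_one.mp (List.mem_filter.mp hvf).1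
  rw [hm, Option.getD_some] at hvb
  refine ⟨f.foldl min v, PySem.List.min?_id_cons v f, ?_⟩
  have hle := (PySem.List.foldl_min_le f v).1
  left; omega

theorem inv_flatMap (num_verts : Int) (adj : PySem.Dict Int (PySem.Set Int))
    (L : List (List Int)) (hL : ∀ f ∈ L, InvF num_verts f) :
    ∀ g ∈ L.flatMap (EBf adj), InvF num_verts g := by
  intro g hg
  rcases List.mem_flatMap.mp hg with ⟨f, hf, hgf⟩
  exact inv_EBf num_verts adj f (hL f hf) g hgf

-- sorted (with the identity key) of a rearrangement is the same list
theorem sorted_perm_eq (xs ys : List (List Int)) (h : xs.Perm ys) :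
    PySem.List.sorted xs (fun x => x) = PySem.List.sorted ys (fun x => x) := by
  have := PySem.List.sorted_eq_sorted_of_perm (κ := List Int) xs ys (fun a => a)
    (fun a b hab => hab) h
  convert this using 2

-- flatMap through if-guarded singleton producers
theorem flatMap_if {α β : Type} (vs : List α) (c : α → Bool) (h : α → List β) :
    vs.flatMap (fun v => if c v then h v else []) = (vs.filter c).flatMap h := by
  induction vs with
  | nil => rfl
  | cons x t ih =>
    by_cases hx : c x = true
    · simp [List.flatMap_cons, hx, ih]
    · simp only [Bool.not_eq_true] at hx
      simp [List.flatMap_cons, hx, ih]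

theorem flatMap_flatMap' {α β γ : Type} (l : List α) (f : α → List β) (g : β → List γ) :
    (l.flatMap f).flatMap g = l.flatMap (fun x => (f x).flatMap g) := by
  induction l with
  | nil => rfl
  | cons x t ih => simp [List.flatMap_cons, List.flatMap_append, ih]

theorem flatMap_map' {α β γ : Type} (l : List α) (f : α → β) (g : β → List γ) :
    (l.map f).flatMap g = l.flatMap (fun x => g (f x)) := by
  induction l with
  | nil => rfl
  | cons x t ih => simp [List.flatMap_cons, ih]

-- getD after PySem.Dict.modify
theorem getD_modify {β : Type} (d : PySem.Dict Int β) (k0 : Int) (df : β) (f : β → β) (k : Int) :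
    PySem.Dict.getD (PySem.Dict.modify d k0 df f) k df
      = if k = k0 then f (PySem.Dict.getD d k0 df) else PySem.Dict.getD d k df := by
  unfold PySem.Dict.modify
  rw [PySem.Dict.getD_insert]

-- swapping the strata: the (j+1)-stratum is the one-step extension of the j-stratum
theorem Sx_swap (adj : PySem.Dict Int (PySem.Set Int)) :
    ∀ (j : Nat) (f : List Int), Sx adj (j+1) f = (Sx adj j f).flatMap (EBf adj) := by
  intro j
  induction j with
  | zero => intro f; rfl
  | succ j ih =>
    intro f
    show (EBf adj f).flatMap (Sx adj (j+1)) = (Sx adj (j+1) f).flatMap (EBf adj)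
    calc (EBf adj f).flatMap (Sx adj (j+1))
        = (EBf adj f).flatMap (fun c => (Sx adj j c).flatMap (EBf adj)) := by
          exact List.flatMap_congr (fun c _ => ih c)
      _ = ((EBf adj f).flatMap (Sx adj j)).flatMap (EBf adj) := (flatMap_flatMap' _ _ _).symm
      _ = (Sx adj (j+1) f).flatMap (EBf adj) := rfl

-- the DFS: what mtB_extend contributes to each level
theorem extend_getD (adj : PySem.Dict Int (PySem.Set Int)) (sd : Int) :
    ∀ (fuel : Nat) (f : List Int) (dim : Int)
      (levels : PySem.Dict Int (List (List Int))) (k : Int),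
      sd - dim < (fuel : Int) →
      PySem.Dict.getD (mtB_extend adj sd fuel f dim levels) k []
        = PySem.Dict.getD levels k []
            ++ (if dim ≤ k ∧ k ≤ sd then Sx adj (k - dim).toNat f else []) := by
  intro fuel
  induction fuel with
  | zero =>
    intro f dim levels k hfu
    rw [show mtB_extend adj sd 0 f dim levels = levels from rfl, if_neg (by omega),
      List.append_nil]
  | succ fuel ih =>
    intro f dim levels k hfu
    show PySem.Dict.getD
        (if sd < dim then levels
         else (PySem.List.pyRange 0 ((PySem.List.min? f (fun x => x)).getD 0)).foldl
           (fun levels v =>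
             if f.all (fun u => PySem.Set.contains (PySem.Dict.getD adj v PySem.Set.empty) u) then
               mtB_extend adj sd fuel (v :: f) (dim + 1)
                 (PySem.Dict.modify levels dim [] (fun l => l ++ [v :: f]))
             else levels) levels) k []
      = _
    by_cases hsd : sd < dim
    · rw [if_pos hsd, if_neg (by omega), List.append_nil]
    · rw [if_neg hsd]
      have hinner : ∀ (vs : List Int) (levels : PySem.Dict Int (List (List Int))),
          PySem.Dict.getD
            (vs.foldl (fun levels v =>
              if f.all (fun u => PySem.Set.contains (PySem.Dict.getD adj v PySem.Set.empty) u) then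
                mtB_extend adj sd fuel (v :: f) (dim + 1)
                  (PySem.Dict.modify levels dim [] (fun l => l ++ [v :: f]))
              else levels) levels) k []
          = PySem.Dict.getD levels k []
              ++ vs.flatMap (fun v =>
                  if f.all (fun u => PySem.Set.contains (PySem.Dict.getD adj v PySem.Set.empty) u) then
                    (if k = dim then [v :: f]
                     else if dim + 1 ≤ k ∧ k ≤ sd then Sx adj (k - (dim + 1)).toNat (v :: f) else [])
                  else []) := by
        intro vs
        induction vs with
        | nil => intro levels; simp
        | cons v t iht =>
          intro levels
          rw [List.foldl_cons, List.flatMap_cons]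
          by_cases hc : f.all (fun u => PySem.Set.contains (PySem.Dict.getD adj v PySem.Set.empty) u) = true
          · rw [if_pos hc, iht, if_pos hc, ih (v :: f) (dim + 1) _ k (by omega),
              getD_modify]
            by_cases hk : k = dim
            · rw [if_pos hk, if_pos hk, if_neg (by omega), List.append_nil, hk,
                List.append_assoc, List.singleton_append]
            · rw [if_neg hk, if_neg hk, List.append_assoc]
          · rw [if_neg (by simp only [hc]; decide), iht,
              if_neg (by simp only [hc]; decide), List.nil_append]
      rw [hinner]
      congr 1
      rw [flatMap_if]
      by_cases hk : k = dim
      · subst hk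
        rw [if_pos ⟨le_refl _, by omega⟩]
        have : (k - k).toNat = 0 := by omega
        rw [this]
        show _ = EBf adj f
        unfold EBf
        rw [← flatMap_if]
        simp only [if_neg (by omega : ¬ (k + 1 ≤ k ∧ k ≤ sd))]
        rw [flatMap_if]
        induction ((PySem.List.pyRange 0 ((PySem.List.min? f (fun x => x)).getD 0)).filter
          (fun v => f.all (fun u => PySem.Set.contains (PySem.Dict.getD adj v PySem.Set.empty) u))) with
        | nil => rfl
        | cons a t iht2 => simp only [List.flatMap_cons, List.map_cons, iht2]; rfl
      · by_cases hk2 : dim + 1 ≤ k ∧ k ≤ sd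
        · rw [if_pos ⟨by omega, hk2.2⟩]
          have hkd : (k - dim).toNat = (k - (dim + 1)).toNat + 1 := by omega
          rw [hkd]
          show _ = (EBf adj f).flatMap (Sx adj (k - (dim + 1)).toNat)
          unfold EBf
          rw [flatMap_map']
          apply List.flatMap_congr
          intro v _
          rw [if_neg hk, if_pos hk2]
        · rw [if_neg (by omega)]
          have : ∀ v ∈ ((PySem.List.pyRange 0 ((PySem.List.min? f (fun x => x)).getD 0)).filter
              (fun v => f.all (fun u => PySem.Set.contains (PySem.Dict.getD adj v PySem.Set.empty) u))),
              (if k = dim then [v :: f]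
               else if dim + 1 ≤ k ∧ k ≤ sd then Sx adj (k - (dim + 1)).toNat (v :: f) else [])
                = ([] : List (List Int)) := by
            intro v _
            rw [if_neg hk, if_neg hk2]
          rw [List.flatMap_congr this]
          simp

-- the edge loop: each level collects the stratified simplices of every edge
theorem edges_fold_getD (adj : PySem.Dict Int (PySem.Set Int)) (sd : Int) :
    ∀ (es : List (List Int)) (levels : PySem.Dict Int (List (List Int))) (k : Int),
      PySem.Dict.getD
        (es.foldl (fun levels e => mtB_extend adj sd (sd - 1).toNat e 2 levels) levels) k []
      = PySem.Dict.getD levels k []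
          ++ (if 2 ≤ k ∧ k ≤ sd then es.flatMap (Sx adj (k - 2).toNat) else []) := by
  intro es
  induction es with
  | nil => intro levels k; simp
  | cons e t ih =>
    intro levels k
    rw [List.foldl_cons, ih, extend_getD adj sd (sd - 1).toNat e 2 levels k (by omega),
      List.append_assoc, List.flatMap_cons]
    congr 1
    by_cases hk : 2 ≤ k ∧ k ≤ sd
    · rw [if_pos hk, if_pos hk, if_pos hk]
    · rw [if_neg hk, if_neg hk, if_neg hk, List.append_nil]

theorem pyRange_nil_of_le (a b : Int) (h : b ≤ a) : PySem.List.pyRange a b = [] := by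
  simp only [PySem.List.pyRange]
  rw [if_neg (by norm_num : ¬ (1:Int) = 0), if_pos (by norm_num : (0:Int) < 1), if_neg (by omega : ¬ a < b)]
  simp

-- level k of B's DFS result, as iterated one-step extensions
def FLx (adj : PySem.Dict Int (PySem.Set Int)) (edges : List (List Int)) (k : Int) :
    List (List Int) := edges.flatMap (Sx adj (k - 2).toNat)

theorem FLx_succ (adj : PySem.Dict Int (PySem.Set Int)) (edges : List (List Int)) (k : Int)
    (hk : 2 ≤ k) : FLx adj edges (k + 1) = (FLx adj edges k).flatMap (EBf adj) := by
  unfold FLx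
  have h1 : (k + 1 - 2).toNat = (k - 2).toNat + 1 := by omega
  rw [h1, flatMap_flatMap']
  exact List.flatMap_congr (fun f _ => Sx_swap adj (k - 2).toNat f)

-- the main loop, in lockstep: A's dim-loop against B's final insertion loop
theorem loop_eq (num_verts : Int) (edges : List (List Int)) (sd : Int) :
    ∀ (n : Nat) (d : Int) (topo : PySem.Dict Int (PySem.Dict Int (List Int)))
      (facets M : List (List Int)), (sd - d).toNat = n → 1 ≤ d →
      PySem.Dict.getD topo d ⟨[]⟩ = ⟨PySem.List.enumerate facets⟩ →
      facets.Perm M →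
      (∀ f ∈ M, InvF num_verts f) →
      FLx (mtB_adj edges) edges (d + 1) = M.flatMap (EBf (mtB_adj edges)) →
      (PySem.List.pyRange d sd).foldl (mtA_step (mtA_adj num_verts edges)) topo
        = (PySem.List.pyRange (d + 1) (sd + 1)).foldl (fun t k =>
            PySem.Dict.insert t k
              ⟨PySem.List.enumerate
                (PySem.List.sorted (FLx (mtB_adj edges) edges k) (fun x => x))⟩) topo := by
  intro n
  induction n with
  | zero =>
    intro d topo facets M hn _ _ _ _ _
    rw [pyRange_nil_of_le d sd (by omega), pyRange_nil_of_le (d+1) (sd+1) (by omega)]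
    rfl
  | succ n ih =>
    intro d topo facets M hn hd hg hperm hInv hFL
    have hdlt : d < sd := by omega
    rw [PySem.List.pyRange_one_cons hdlt, PySem.List.pyRange_one_cons (by omega : d + 1 < sd + 1),
      List.foldl_cons, List.foldl_cons]
    have hInvF : ∀ f ∈ facets, InvF num_verts f := fun f hf => hInv f (hperm.mem_iff.mp hf)
    rw [step_eq num_verts edges topo facets d hg hInvF]
    have hsorted : PySem.List.sorted (facets.flatMap (EBf (mtB_adj edges))) (fun e => e)
        = PySem.List.sorted (FLx (mtB_adj edges) edges (d + 1)) (fun x => x) := by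
      rw [hFL]
      exact sorted_perm_eq _ _ (hperm.flatMap (fun a _ => List.Perm.refl _))
    rw [hsorted]
    exact ih (d + 1) _
      (PySem.List.sorted (FLx (mtB_adj edges) edges (d + 1)) (fun x => x))
      (FLx (mtB_adj edges) edges (d + 1))
      (by omega) (by omega)
      (by rw [PySem.Dict.getD_insert, if_pos rfl])
      (PySem.List.sorted_perm _ _ _)
      (by rw [hFL]; exact inv_flatMap num_verts _ M hInv)
      (by rw [FLx_succ _ _ (d + 1) (by omega)])

-- ===== VERDICT (by name: the statement is the Claim_ definition above) =====
theorem make_topology_spec : Claim_equal_make_topology := by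
  intro sd num_verts edges _ hPre
  unfold Spec_make_topology make_topology make_topology_alt
  dsimp only
  by_cases hsd : sd ≤ 1
  · rw [pyRange_nil_of_le 1 sd hsd, pyRange_nil_of_le 2 (sd + 1) (by omega)]
    rfl
  · rcases hPre with h | hPre
    · omega
    have hInvE : ∀ f ∈ edges, InvF num_verts f := by
      intro f hfe
      rcases hPre f hfe with ⟨x, hx, hxb⟩
      have hne : f ≠ [] := by rintro rfl; exact absurd hx (List.not_mem_nil)
      obtain ⟨m, hm⟩ : ∃ m, PySem.List.min? f (fun x => x) = some m := by
        cases h : PySem.List.min? f (fun x => x) with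
        | none => exact absurd ((PySem.List.min?_eq_none_iff f _).mp h) hne
        | some m => exact ⟨m, rfl⟩
      exact ⟨m, hm, by have := PySem.List.min?_isMin hm x hx; omega⟩
    -- rewrite B's final loop: each level read from the DFS result is FLx
    have h2 := PySem.List.foldl_congr_mem (PySem.List.pyRange 2 (sd + 1))
      (fun (topo : PySem.Dict Int (PySem.Dict Int (List Int))) (d : Int) =>
        PySem.Dict.insert topo d
          ⟨PySem.List.enumerate
            (PySem.List.sorted
              (PySem.Dict.getD
                (edges.foldl (fun levels e =>
                  mtB_extend (mtB_adj edges) sd (sd - 1).toNat e 2 levels)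
                  ⟨(PySem.List.pyRange 2 (sd + 1)).map (fun d => (d, ([] : List (List Int))))⟩) d [])
              (fun x => x))⟩)
      (fun (topo : PySem.Dict Int (PySem.Dict Int (List Int))) (k : Int) =>
        PySem.Dict.insert topo k
          ⟨PySem.List.enumerate
            (PySem.List.sorted (FLx (mtB_adj edges) edges k) (fun x => x))⟩)
      (PySem.Dict.insert
        (PySem.Dict.insert (⟨[]⟩ : PySem.Dict Int (PySem.Dict Int (List Int))) 0
          ⟨(PySem.List.pyRange 0 num_verts).map (fun i => (i, [i]))⟩)
        1 ⟨PySem.List.enumerate (PySem.List.sorted edges (fun e => e))⟩)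
      (by
        intro topo k hk
        have hk2 := PySem.List.mem_pyRange_one.mp hk
        have hlev : PySem.Dict.getD
            (edges.foldl (fun levels e =>
              mtB_extend (mtB_adj edges) sd (sd - 1).toNat e 2 levels)
              ⟨(PySem.List.pyRange 2 (sd + 1)).map (fun d => (d, ([] : List (List Int))))⟩) k []
            = FLx (mtB_adj edges) edges k := by
          rw [edges_fold_getD, getD_mapComp (f := fun _ => ([] : List (List Int)))]
          have h1 : (if k ∈ PySem.List.pyRange 2 (sd + 1) then ([] : List (List Int)) else [])
              = [] := by split <;> rfl
          rw [h1, List.nil_append,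
            if_pos (show 2 ≤ k ∧ k ≤ sd from ⟨hk2.1, by omega⟩)]
          rfl
        simp only [hlev])
    have h1 := loop_eq num_verts edges sd (sd - 1).toNat 1
      (PySem.Dict.insert
        (PySem.Dict.insert (⟨[]⟩ : PySem.Dict Int (PySem.Dict Int (List Int))) 0
          ⟨(PySem.List.pyRange 0 num_verts).map (fun i => (i, [i]))⟩)
        1 ⟨PySem.List.enumerate (PySem.List.sorted edges (fun e => e))⟩)
      (PySem.List.sorted edges (fun e => e)) edges rfl (le_refl 1)
      (by rw [PySem.Dict.getD_insert, if_pos rfl])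
      (PySem.List.sorted_perm _ _ _) hInvE
      (by unfold FLx; norm_num; rfl)
    rw [h1.trans h2.symm]
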